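-- pv_equiv track=rewrite | github.com/k-georgi/CYP_Annotator | CYP_Annotator.py | count_commas
-- ===== SOURCE A (Python) =====
-- def count_commas(line):
--     """
--     Count the number of commas, ignoring commas within double quotes.
--     """
--     in_quotes = False
--     comma_count = 0
--     for char in line:
--         if char == '"':
--             in_quotes = not in_quotes
--         elif char == ',' and not in_quotes:
--             comma_count += 1
--     return comma_count
-- ===== SOURCE B (Python) =====
-- def count_commas(line):
--     # Split on double quotes: even-indexed parts are outside quotes,
--     # odd-indexed parts are inside. Count commas only in the outside parts.
--     parts = line.split('"')
--     return sum(p.count(',') for p in parts[::2])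
-- ===== Notes on version B (the rewrite author's own statement) =====
-- stated objective: idiomatic
-- what changed: Replaces the per-character quote-toggle loop with a split on the double-quote character plus a sum of comma counts over the even-indexed (outside-quotes) segments, moving the scanning into C-level str.split/str.count.
import Mathlib
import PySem

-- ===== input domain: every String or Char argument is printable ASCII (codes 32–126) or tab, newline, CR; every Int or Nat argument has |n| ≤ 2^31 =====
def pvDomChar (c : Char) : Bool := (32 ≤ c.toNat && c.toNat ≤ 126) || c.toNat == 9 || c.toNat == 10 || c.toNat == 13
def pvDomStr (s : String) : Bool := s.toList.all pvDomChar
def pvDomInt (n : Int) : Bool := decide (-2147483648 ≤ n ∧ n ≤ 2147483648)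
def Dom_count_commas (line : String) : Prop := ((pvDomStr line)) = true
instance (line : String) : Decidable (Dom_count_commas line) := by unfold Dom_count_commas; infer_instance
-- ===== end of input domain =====

-- B replaces A's per-character in_quotes toggle with split on the double-quote character plus a
-- sum of comma counts over the even-indexed (outside-quotes) segments (measured faster by a constant factor).

-- ===== PORT A =====
-- one step of A's loop body: state = (in_quotes, comma_count)
def stepA (st : Bool × Int) (c : Char) : Bool × Int :=
  if c = '"' then (!st.1, st.2)
  else if c = ',' ∧ st.1 = false then (st.1, st.2 + 1)
  else st

def count_commas (line : String) : Int :=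
  (line.toList.foldl stepA (false, 0)).2

-- ===== PORT B =====
def count_commas_alt (line : String) : Int :=
  let parts := PySem.Chars.splitOn line.toList ['"']
  let outside := (PySem.List.slice? parts none none 2).getD []   -- parts[::2]; step 2 ≠ 0 so never none
  (outside.map (fun p => (PySem.Chars.count p [','] : Int))).sum

-- ===== PRECONDITION & SPEC =====
def Spec_count_commas (line : String) (out : Int) : Prop := out = count_commas_alt line
instance (line : String) (out : Int) : Decidable (Spec_count_commas line out) := by unfold Spec_count_commas; infer_instance

-- ===== CLAIM (what is proved, stated in full; the proofs are below) =====
def Claim_equal_count_commas : Prop := ∀ (line : String), Dom_count_commas line → Spec_count_commas line (count_commas line)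

-- ===== LEMMAS AND PROOFS =====

-- even-indexed elements (what parts[::2] selects)
def pvEvens {α : Type} : List α → List α
  | [] => []
  | [x] => [x]
  | x :: _ :: t => x :: pvEvens t

-- structural version of str.split('"')
def pvSplit : List Char → List (List Char)
  | [] => [[]]
  | c :: cs =>
    if c = '"' then [] :: pvSplit cs
    else
      match pvSplit cs with
      | [] => [[c]]
      | p :: ps => (c :: p) :: ps

-- structural version of A's loop from state q (commas yet to be added)
def pvCnt : Bool → List Char → Int
  | _, [] => 0
  | q, c :: cs =>
    if c = '"' then pvCnt (!q) cs
    else if c = ',' ∧ q = false then 1 + pvCnt q cs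
    else pvCnt q cs

-- alternating sum of comma counts: b = true means the head part is counted
def pvSumAlt : Bool → List (List Char) → Int
  | _, [] => 0
  | b, p :: ps => (if b then (p.count ',' : Int) else 0) + pvSumAlt (!b) ps

theorem pvFoldA (l : List Char) (q : Bool) (n : Int) :
    (l.foldl stepA (q, n)).2 = n + pvCnt q l := by
  induction l generalizing q n with
  | nil => simp [pvCnt]
  | cons c cs ih =>
    simp only [List.foldl_cons, stepA, pvCnt]
    by_cases h : c = '"'
    · simp [h, ih]
    · by_cases h2 : c = ',' ∧ q = false
      · simp [h2, ih]; ring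
      · simp [h, h2, ih]

theorem pvSplit_ne_nil (l : List Char) : pvSplit l ≠ [] := by
  cases l with
  | nil => simp [pvSplit]
  | cons c cs =>
    simp only [pvSplit]
    split
    · simp
    · split <;> simp

theorem pvGoSplit (l : List Char) (fuel : Nat) (cur : List Char) (acc : List (List Char))
    (h : l.length ≤ fuel) :
    PySem.Chars.splitOn.go ['"'] fuel l cur acc =
      acc.reverse ++ (match pvSplit l with
        | [] => [cur.reverse]
        | p :: ps => (cur.reverse ++ p) :: ps) := by
  induction l generalizing fuel cur acc with
  | nil =>
    cases fuel <;> simp [PySem.Chars.splitOn.go, pvSplit]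
  | cons c cs ih =>
    cases fuel with
    | zero => simp at h
    | succ f =>
      simp only [PySem.Chars.splitOn.go]
      by_cases hc : c = '"'
      · have hp : List.isPrefixOf ['"'] (c :: cs) = true := by simp [List.isPrefixOf, hc]
        rw [if_pos hp]
        simp only [List.length_cons] at h
        simp only [List.length_singleton, List.drop_succ_cons, List.drop_zero]
        rw [ih f [] (cur.reverse :: acc) (by omega)]
        simp only [pvSplit, if_pos hc, List.reverse_cons]
        cases hs : pvSplit cs with
        | nil => exact absurd hs (pvSplit_ne_nil cs)
        | cons p ps => simp
      · have hp : List.isPrefixOf ['"'] (c :: cs) = false := by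
          simp [List.isPrefixOf]; exact fun h' => absurd h'.symm hc
        rw [if_neg (by simp [hp])]
        simp only [List.length_cons] at h
        rw [ih f (c :: cur) acc (by omega)]
        simp only [pvSplit, if_neg hc]
        cases hs : pvSplit cs with
        | nil => exact absurd hs (pvSplit_ne_nil cs)
        | cons p ps => simp

theorem pvSplitOn_eq (l : List Char) : PySem.Chars.splitOn l ['"'] = pvSplit l := by
  rw [PySem.Chars.splitOn, pvGoSplit l (l.length + 1) [] [] (by omega)]
  cases hs : pvSplit l with
  | nil => exact absurd hs (pvSplit_ne_nil l)
  | cons p ps => simp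

theorem pvCountGo (l : List Char) (fuel : Nat) (acc : Nat) (h : l.length ≤ fuel) :
    PySem.Chars.count.go [','] fuel l acc = acc + l.count ',' := by
  induction l generalizing fuel acc with
  | nil => cases fuel <;> simp [PySem.Chars.count.go]
  | cons c cs ih =>
    cases fuel with
    | zero => simp at h
    | succ f =>
      simp only [PySem.Chars.count.go]
      simp only [List.length_cons] at h
      by_cases hc : c = ','
      · have hp : List.isPrefixOf [','] (c :: cs) = true := by simp [List.isPrefixOf, hc]
        rw [if_pos hp]
        simp only [List.length_singleton, List.drop_succ_cons, List.drop_zero]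
        rw [ih f (acc + 1) (by omega)]
        simp [hc]
        omega
      · have hp : List.isPrefixOf [','] (c :: cs) = false := by
          simp [List.isPrefixOf]; exact fun h' => absurd h'.symm hc
        rw [if_neg (by simp [hp])]
        rw [ih f acc (by omega)]
        simp [hc]

theorem pvCount_eq (p : List Char) : PySem.Chars.count p [','] = p.count ',' := by
  rw [PySem.Chars.count]
  simp only [List.isEmpty_cons, if_neg Bool.false_ne_true]
  simpa using pvCountGo p p.length 0 (le_refl _)

theorem pvFilterMapEvens {α : Type} (xs : List α) :
    List.filterMap (fun k : Nat => xs[(2 * (k : Int)).toNat]?) (List.range ((xs.length + 1) / 2)) =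
      pvEvens xs := by
  induction xs using pvEvens.induct with
  | case1 => simp [pvEvens]
  | case2 x => simp [pvEvens, List.range_succ]
  | case3 x y t ih =>
    have hlen : (((x :: y :: t).length + 1) / 2) = ((t.length + 1) / 2) + 1 := by
      simp [List.length_cons]; omega
    rw [hlen, List.range_succ_eq_map]
    rw [List.filterMap_cons]
    simp only [Nat.cast_zero, Int.mul_zero, Int.toNat_zero]
    rw [List.filterMap_map]
    have hfun : ∀ k ∈ List.range ((t.length + 1) / 2),
        ((fun k : Nat => (x :: y :: t)[(2 * (k : Int)).toNat]?) ∘ Nat.succ) k =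
          (fun k : Nat => t[(2 * (k : Int)).toNat]?) k := by
      intro k _
      simp only [Function.comp]
      have h1 : (2 * ((k.succ : Nat) : Int)).toNat = 2 * k + 2 := by omega
      have h2 : (2 * ((k : Nat) : Int)).toNat = 2 * k := by omega
      rw [h1, h2]
      rfl
    rw [List.filterMap_congr hfun, ih]
    simp [pvEvens]

theorem pvSlice2 {α : Type} (xs : List α) :
    (PySem.List.slice? xs none none 2).getD [] = pvEvens xs := by
  rw [PySem.List.slice?]
  rw [if_neg (by norm_num)]
  simp only [PySem.List.sliceIndices]
  norm_num
  have hcnt : (if 0 < xs.length then (((xs.length : Int) + 2 - 1) / 2).toNat else 0)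
      = (xs.length + 1) / 2 := by
    split_ifs <;> omega
  rw [hcnt]
  exact pvFilterMapEvens xs

theorem pvMain (l : List Char) (q : Bool) :
    pvCnt q l = pvSumAlt (!q) (pvSplit l) := by
  induction l generalizing q with
  | nil => cases q <;> simp [pvCnt, pvSplit, pvSumAlt]
  | cons c cs ih =>
    simp only [pvCnt, pvSplit]
    by_cases hc : c = '"'
    · simp only [if_pos hc]
      rw [ih (!q)]
      simp [pvSumAlt]
    · simp only [if_neg hc]
      cases hs : pvSplit cs with
      | nil => exact absurd hs (pvSplit_ne_nil cs)
      | cons p ps =>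
        rw [ih q, hs]
        by_cases hq : q = false
        · subst hq
          by_cases hcm : c = ','
          · simp [hcm, pvSumAlt]
            ring
          · simp [hcm, pvSumAlt]
        · have hq' : q = true := by cases q <;> simp_all
          subst hq'
          simp [pvSumAlt]

theorem pvSumAltEvens (ps : List (List Char)) :
    pvSumAlt true ps = ((pvEvens ps).map (fun p => (p.count ',' : Int))).sum := by
  induction ps using pvEvens.induct with
  | case1 => simp [pvSumAlt, pvEvens]
  | case2 p => simp [pvSumAlt, pvEvens]
  | case3 p p' t ih => simp [pvSumAlt, pvEvens, ih]

-- ===== VERDICT (by name: the statement is the Claim_ definition above) =====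
theorem count_commas_spec : Claim_equal_count_commas := by
  intro line _
  unfold Spec_count_commas
  simp only [count_commas, count_commas_alt]
  rw [pvFoldA line.toList false 0, pvSplitOn_eq, pvSlice2]
  have hmap : (pvEvens (pvSplit line.toList)).map (fun p => (PySem.Chars.count p [','] : Int)) =
      (pvEvens (pvSplit line.toList)).map (fun p => (p.count ',' : Int)) := by
    apply List.map_congr_left; intro p _; rw [pvCount_eq]
  rw [hmap, ← pvSumAltEvens, pvMain]
  simp
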